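-- pv_equiv track=rewrite | github.com/Rotz-kirwa/Agent-21-Scout | telegram_jobs.py | fetch_buffer_jobs
-- ===== SOURCE A (Python) =====
-- def fetch_buffer_jobs(keywords):
--     """
--     Fetch remote jobs from Buffer (fully distributed since 2012)
--     """
--     jobs = []
--
--     if any(word in keywords for word in ["developer", "programming", "software"]):
--         jobs.extend([
--             {
--                 "title": "Software Engineer",
--                 "company": "Buffer",
--                 "location": "Remote - Worldwide",
--                 "url": "https://buffer.com/journey",
--                 "source": "Buffer",
--                 "salary": "$80-130k/year"
--             }
--         ])
--
--     if any(word in keywords for word in ["content", "writing", "marketing"]):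
--         jobs.extend([
--             {
--                 "title": "Content Creator",
--                 "company": "Buffer",
--                 "location": "Remote - Global",
--                 "url": "https://buffer.com/journey",
--                 "source": "Buffer",
--                 "salary": "$50-80k/year"
--             }
--         ])
--
--     return jobs
-- ===== SOURCE B (Python) =====
-- _KW_TO_JOB = {
--     "developer": 0, "programming": 0, "software": 0,
--     "content": 1, "writing": 1, "marketing": 1,
-- }
--
-- _JOBS = [
--     {
--         "title": "Software Engineer",
--         "company": "Buffer",
--         "location": "Remote - Worldwide",
--         "url": "https://buffer.com/journey",
--         "source": "Buffer",
--         "salary": "$80-130k/year",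
--     },
--     {
--         "title": "Content Creator",
--         "company": "Buffer",
--         "location": "Remote - Global",
--         "url": "https://buffer.com/journey",
--         "source": "Buffer",
--         "salary": "$50-80k/year",
--     },
-- ]
--
--
-- def fetch_buffer_jobs(keywords):
--     """Fetch remote jobs from Buffer: single pass over the keywords through an
--     inverted keyword->job-index dict, collecting hit indices into a set."""
--     hits = set()
--     for k in keywords:
--         i = _KW_TO_JOB.get(k)
--         if i is not None:
--             hits.add(i)
--     return [job for i, job in enumerate(_JOBS) if i in hits]
-- ===== Notes on version B (the rewrite author's own statement) =====
-- stated objective: alternative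
-- what changed: Inverts the traversal: instead of testing each hardcoded trigger word for membership in keywords per job (two any-scans over keywords), B makes one pass over the keywords, looks each up in an inverted keyword-to-job-index dict, accumulates hit indices in a set, and emits the jobs whose index was hit.
import Mathlib
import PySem

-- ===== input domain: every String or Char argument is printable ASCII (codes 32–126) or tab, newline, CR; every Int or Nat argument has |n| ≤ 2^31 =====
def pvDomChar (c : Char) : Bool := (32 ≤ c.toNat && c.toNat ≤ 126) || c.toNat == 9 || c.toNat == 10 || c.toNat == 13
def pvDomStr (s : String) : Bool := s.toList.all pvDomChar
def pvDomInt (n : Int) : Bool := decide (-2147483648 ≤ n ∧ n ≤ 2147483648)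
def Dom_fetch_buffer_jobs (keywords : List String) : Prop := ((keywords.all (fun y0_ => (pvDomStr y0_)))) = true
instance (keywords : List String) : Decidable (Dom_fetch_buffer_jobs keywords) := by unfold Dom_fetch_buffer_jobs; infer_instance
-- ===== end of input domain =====

-- ===== PORT A =====
-- B inverts the traversal (one pass over keywords through a keyword->job-index dict,
-- collecting hit indices in a set); A does per-job any-membership scans. Same values.
def pvJob1 : List (String × String) :=
  [("title", "Software Engineer"), ("company", "Buffer"),
   ("location", "Remote - Worldwide"), ("url", "https://buffer.com/journey"),
   ("source", "Buffer"), ("salary", "$80-130k/year")]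

def pvJob2 : List (String × String) :=
  [("title", "Content Creator"), ("company", "Buffer"),
   ("location", "Remote - Global"), ("url", "https://buffer.com/journey"),
   ("source", "Buffer"), ("salary", "$50-80k/year")]

def fetch_buffer_jobs (keywords : List String) : List (List (String × String)) :=
  let jobs : List (List (String × String)) := []
  let jobs :=
    if ["developer", "programming", "software"].any (fun word => keywords.contains word)
    then jobs ++ [pvJob1] else jobs
  let jobs :=
    if ["content", "writing", "marketing"].any (fun word => keywords.contains word)
    then jobs ++ [pvJob2] else jobs
  jobs

-- ===== PORT B =====
def pvKwToJob : PySem.Dict String Int :=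
  PySem.Dict.ofList
    [("developer", 0), ("programming", 0), ("software", 0),
     ("content", 1), ("writing", 1), ("marketing", 1)]

def pvJobs : List (List (String × String)) := [pvJob1, pvJob2]

def fetch_buffer_jobs_alt (keywords : List String) : List (List (String × String)) :=
  let hits : PySem.Set Int :=
    keywords.foldl (fun s k =>
      match PySem.Dict.get? pvKwToJob k with
      | some i => PySem.Set.add s i
      | none => s) PySem.Set.empty
  ((PySem.List.enumerate pvJobs).filter (fun p => PySem.Set.contains hits p.1)).map (·.2)

-- ===== PRECONDITION & SPEC =====
def Spec_fetch_buffer_jobs (keywords : List String) (out : List (List (String × String))) : Prop := out = fetch_buffer_jobs_alt keywords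
instance (keywords : List String) (out : List (List (String × String))) : Decidable (Spec_fetch_buffer_jobs keywords out) := by unfold Spec_fetch_buffer_jobs; infer_instance

-- ===== CLAIM (what is proved, stated in full; the proofs are below) =====
def Claim_equal_fetch_buffer_jobs : Prop := ∀ (keywords : List String), Dom_fetch_buffer_jobs keywords → Spec_fetch_buffer_jobs keywords (fetch_buffer_jobs keywords)

-- ===== LEMMAS AND PROOFS =====

-- lookup in the literal inverted dict, as a per-key case formula
lemma pvKwToJob_get? (k : String) :
    PySem.Dict.get? pvKwToJob k =
      if k = "developer" ∨ k = "programming" ∨ k = "software" then some 0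
      else if k = "content" ∨ k = "writing" ∨ k = "marketing" then some 1
      else none := by
  rw [show pvKwToJob = PySem.Dict.mk
      [("developer", 0), ("programming", 0), ("software", 0),
       ("content", 1), ("writing", 1), ("marketing", 1)] from by decide]
  simp only [PySem.Dict.get?_mk_cons, beq_iff_eq]
  split_ifs <;> simp_all [PySem.Dict.get?] <;> tauto

-- membership in the accumulated hit set
lemma mem_hits (i : Int) (ks : List String) (s : PySem.Set Int) :
    i ∈ ks.foldl (fun s k =>
        match PySem.Dict.get? pvKwToJob k with
        | some j => PySem.Set.add s j
        | none => s) s ↔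
      i ∈ s ∨ ∃ k ∈ ks, PySem.Dict.get? pvKwToJob k = some i := by
  induction ks generalizing s with
  | nil => simp
  | cons k ks ih =>
    simp only [List.foldl_cons]
    cases h : PySem.Dict.get? pvKwToJob k with
    | none =>
      rw [ih]
      constructor
      · rintro (hs | hx)
        · exact Or.inl hs
        · obtain ⟨k', hk', hg⟩ := hx; exact Or.inr ⟨k', List.mem_cons_of_mem _ hk', hg⟩
      · rintro (hs | ⟨k', hk', hg⟩)
        · exact Or.inl hs
        · rcases List.mem_cons.mp hk' with rfl | hk''
          · rw [h] at hg; exact absurd hg (by simp)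
          · exact Or.inr ⟨k', hk'', hg⟩
    | some j =>
      rw [ih]
      simp only [PySem.Set.mem_add]
      constructor
      · rintro ((hs | rfl) | ⟨k', hk', hg⟩)
        · exact Or.inl hs
        · exact Or.inr ⟨k, List.mem_cons_self, h⟩
        · exact Or.inr ⟨k', List.mem_cons_of_mem _ hk', hg⟩
      · rintro (hs | ⟨k', hk', hg⟩)
        · exact Or.inl (Or.inl hs)
        · rcases List.mem_cons.mp hk' with rfl | hk''
          · rw [h] at hg; exact Or.inl (Or.inr (Option.some.inj hg).symm)
          · exact Or.inr ⟨k', hk'', hg⟩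

lemma exists_mem_eq_or (ks : List String) (a b c : String) :
    (∃ k ∈ ks, k = a ∨ k = b ∨ k = c) ↔ (a ∈ ks ∨ b ∈ ks ∨ c ∈ ks) := by
  constructor
  · rintro ⟨k, hk, rfl | rfl | rfl⟩ <;> tauto
  · rintro (h | h | h)
    · exact ⟨a, h, Or.inl rfl⟩
    · exact ⟨b, h, Or.inr (Or.inl rfl)⟩
    · exact ⟨c, h, Or.inr (Or.inr rfl)⟩

-- ===== VERDICT (by name: the statement is the Claim_ definition above) =====
theorem fetch_buffer_jobs_spec : Claim_equal_fetch_buffer_jobs := by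
  intro keywords _
  unfold Spec_fetch_buffer_jobs fetch_buffer_jobs fetch_buffer_jobs_alt
  have h0 : ∀ k, PySem.Dict.get? pvKwToJob k = some 0 ↔
      k = "developer" ∨ k = "programming" ∨ k = "software" := by
    intro k; rw [pvKwToJob_get?]; split_ifs with ha hb
    · simp [ha]
    · constructor
      · intro h; exact absurd (Option.some.inj h) (by decide)
      · intro hc; exfalso; rcases hc with rfl | rfl | rfl <;> revert hb <;> decide
    · simp_all
  have h1 : ∀ k, PySem.Dict.get? pvKwToJob k = some 1 ↔
      k = "content" ∨ k = "writing" ∨ k = "marketing" := by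
    intro k; rw [pvKwToJob_get?]; split_ifs with ha hb
    · constructor
      · intro h; exact absurd (Option.some.inj h) (by decide)
      · intro hc; exfalso; rcases ha with rfl | rfl | rfl <;> revert hc <;> decide
    · simp [hb]
    · simp_all
  have m0 := mem_hits 0 keywords PySem.Set.empty
  have m1 := mem_hits 1 keywords PySem.Set.empty
  simp only [PySem.Set.empty, List.not_mem_nil, false_or, h0, exists_mem_eq_or] at m0
  simp only [PySem.Set.empty, List.not_mem_nil, false_or, h1, exists_mem_eq_or] at m1
  by_cases c1 : "developer" ∈ keywords ∨ "programming" ∈ keywords ∨ "software" ∈ keywords <;>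
  by_cases c2 : "content" ∈ keywords ∨ "writing" ∈ keywords ∨ "marketing" ∈ keywords <;>
    simp [pvJobs, PySem.List.enumerate, List.filter, PySem.Set.contains,
      List.contains_eq_mem, m0, m1, c1, c2]
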